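-- pv_equiv track=rewrite | github.com/IainMac32/tutorials | DSAas2/4132.py | count_parallel_edges
-- ===== SOURCE A (Python) =====
-- def count_parallel_edges(edges):
--     # Dictionary to store edge counts
--     edge_counts = {}
--
--     # Step 1: Count occurrences of each edge
--     for u, v in edges:
--         # Normalize the edge (min, max) for undirected graph
--         edge = (min(u, v), max(u, v))
--         if edge in edge_counts:
--             edge_counts[edge] += 1
--         else:
--             edge_counts[edge] = 1
--
--     # Step 2: Count the number of parallel edges
--     parallel_count = 0
--     for count in edge_counts.values():
--         if count > 1:
--             # Add the extra occurrences as parallel edges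
--             parallel_count += count - 1
--
--     return parallel_count
-- ===== SOURCE B (Python) =====
-- def count_parallel_edges(edges):
--     total = 0
--     seen = set()
--     for u, v in edges:
--         total += 1
--         seen.add((min(u, v), max(u, v)))
--     return total - len(seen)
-- ===== Notes on version B (the rewrite author's own statement) =====
-- stated objective: simpler
-- what changed: Replaces A's two passes (build a per-edge count dict, then scan its values adding count-1 for counts > 1) with a single pass that tallies the total and a set of distinct normalized edges, returning total - len(seen).
import Mathlib
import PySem

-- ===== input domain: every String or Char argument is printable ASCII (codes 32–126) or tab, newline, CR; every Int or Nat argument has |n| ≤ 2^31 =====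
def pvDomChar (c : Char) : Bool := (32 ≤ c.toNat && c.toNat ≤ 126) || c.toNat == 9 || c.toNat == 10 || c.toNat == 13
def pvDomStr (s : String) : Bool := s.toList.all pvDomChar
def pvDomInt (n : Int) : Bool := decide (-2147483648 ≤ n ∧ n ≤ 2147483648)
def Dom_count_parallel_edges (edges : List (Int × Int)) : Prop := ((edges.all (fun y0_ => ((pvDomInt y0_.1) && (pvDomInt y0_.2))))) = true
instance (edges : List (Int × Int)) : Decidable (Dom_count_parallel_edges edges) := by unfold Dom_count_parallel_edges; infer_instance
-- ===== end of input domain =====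

-- B replaces A's two passes (count dict, then scan counts) by one pass keeping a running
-- total and a set of distinct normalized edges, returning total - len(seen): simpler.

-- ===== PORT A =====
def count_parallel_edges (edges : List (Int × Int)) : Int :=
  -- Step 1: count occurrences of each normalized edge
  let edge_counts : PySem.Dict (Int × Int) Int :=
    edges.foldl (fun d uv =>
      let edge := (min uv.1 uv.2, max uv.1 uv.2)
      if d.contains edge then d.modify edge 0 (· + 1) else d.insert edge 1)
      PySem.Dict.empty
  -- Step 2: sum the extra occurrences
  edge_counts.values.foldl (fun parallel_count c =>
    if c > 1 then parallel_count + (c - 1) else parallel_count) 0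

-- ===== PORT B =====
def count_parallel_edges_alt (edges : List (Int × Int)) : Int :=
  let st := edges.foldl
    (fun (st : Int × PySem.Set (Int × Int)) uv =>
      (st.1 + 1, st.2.add (min uv.1 uv.2, max uv.1 uv.2)))
    ((0 : Int), PySem.Set.empty)
  st.1 - PySem.Set.len st.2

-- ===== PRECONDITION & SPEC =====
def Spec_count_parallel_edges (edges : List (Int × Int)) (out : Int) : Prop := out = count_parallel_edges_alt edges
instance (edges : List (Int × Int)) (out : Int) : Decidable (Spec_count_parallel_edges edges out) := by unfold Spec_count_parallel_edges; infer_instance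

-- ===== CLAIM (what is proved, stated in full; the proofs are below) =====
def Claim_equal_count_parallel_edges : Prop := ∀ (edges : List (Int × Int)), Dom_count_parallel_edges edges → Spec_count_parallel_edges edges (count_parallel_edges edges)

-- ===== LEMMAS AND PROOFS =====

-- the normalization both programs apply to an edge
def pvNorm (uv : Int × Int) : Int × Int := (min uv.1 uv.2, max uv.1 uv.2)

-- A's branch 'if edge in d: d[edge] += 1 else: d[edge] = 1' is d.modify edge 0 (· + 1)
lemma stepA_eq_modify (d : PySem.Dict (Int × Int) Int) (e : Int × Int) :
    (if d.contains e then d.modify e 0 (· + 1) else d.insert e 1) = d.modify e 0 (· + 1) := by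
  by_cases h : d.contains e
  · simp [h]
  · simp [h, PySem.Dict.modify, PySem.Dict.insert, PySem.Dict.getD_of_not_contains]

-- A's first loop builds Counter(map(pvNorm, edges))
lemma foldA_eq_counter (edges : List (Int × Int)) :
    edges.foldl (fun d uv =>
      let edge := (min uv.1 uv.2, max uv.1 uv.2)
      if d.contains edge then d.modify edge 0 (· + 1) else d.insert edge 1)
      PySem.Dict.empty
    = PySem.Dict.counter (edges.map pvNorm) := by
  rw [PySem.Dict.counter_eq_foldl, List.foldl_map]
  simp only [stepA_eq_modify]
  rfl

-- A's second loop, on a list of values that are all ≥ 1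
lemma foldl_extras (vs : List Int) (a : Int) (h : ∀ v ∈ vs, 1 ≤ v) :
    vs.foldl (fun parallel_count c =>
      if c > 1 then parallel_count + (c - 1) else parallel_count) a
    = a + vs.sum - vs.length := by
  induction vs generalizing a with
  | nil => simp
  | cons v t ih =>
      have hv : 1 ≤ v := h v (by simp)
      have ht : ∀ w ∈ t, 1 ≤ w := fun w hw => h w (by simp [hw])
      simp only [List.foldl_cons, List.sum_cons, List.length_cons]
      rw [ih _ ht]
      split_ifs with hgt <;> push_cast <;> omega

-- List.count agrees under the two lawful BEq instances on pairs in play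
lemma count_beq_eq (a : Int × Int) (xs : List (Int × Int)) :
    @List.count _ instBEqOfDecidableEq a xs = @List.count _ instBEqProd a xs := by
  induction xs with
  | nil => rfl
  | cons x t ih => simp [List.count_cons, ih]

-- sum of the multiplicities over the distinct elements is the length
lemma sum_counts (xs : List (Int × Int)) :
    ((PySem.Set.ofList xs).map (fun k => (List.count k xs : Int))).sum = (xs.length : Int) := by
  rw [← List.sum_toFinset _ (PySem.Set.nodup_ofList xs)]
  have hfs : (PySem.Set.ofList xs).toFinset = xs.toFinset := by
    ext a; simp [PySem.Set.mem_ofList]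
  have h2 : ∑ a ∈ xs.toFinset, List.count a xs = xs.length := by
    have h := Multiset.toFinset_sum_count_eq (xs : Multiset (Int × Int))
    rw [Multiset.coe_card] at h
    rw [← h]
    apply Finset.sum_congr
    · simp
    · intro a _
      simp only [Multiset.coe_count]
      exact (count_beq_eq a xs).symm
  rw [hfs, ← h2, Nat.cast_sum]

-- B's loop state: total = initial total + number of edges, seen = Set.add-fold
lemma foldB_state (edges : List (Int × Int)) (t : Int) (s : PySem.Set (Int × Int)) :
    edges.foldl
      (fun (st : Int × PySem.Set (Int × Int)) uv =>
        (st.1 + 1, st.2.add (min uv.1 uv.2, max uv.1 uv.2)))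
      (t, s)
    = (t + edges.length, (edges.map pvNorm).foldl PySem.Set.add s) := by
  induction edges generalizing t s with
  | nil => simp
  | cons e tl ih =>
      simp only [List.foldl_cons, List.map_cons, List.length_cons, ih]
      exact congrArg₂ Prod.mk (by push_cast; ring) rfl

-- ===== VERDICT (by name: the statement is the Claim_ definition above) =====
theorem count_parallel_edges_spec : Claim_equal_count_parallel_edges := by
  intro edges _
  unfold Spec_count_parallel_edges count_parallel_edges count_parallel_edges_alt
  rw [foldA_eq_counter, foldB_state]
  set xs := edges.map pvNorm with hxs
  have hvals : (PySem.Dict.counter xs).values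
      = (PySem.Set.ofList xs).map (fun k => (List.count k xs : Int)) := by
    simp only [PySem.Dict.values, PySem.Dict.items_counter, List.map_map]
    rfl
  have hge : ∀ v ∈ (PySem.Dict.counter xs).values, 1 ≤ v := by
    intro v hv
    rw [hvals] at hv
    obtain ⟨k, hk, rfl⟩ := List.mem_map.mp hv
    have : 0 < List.count k xs := List.count_pos_iff.mpr ((PySem.Set.mem_ofList xs k).mp hk)
    exact_mod_cast this
  rw [foldl_extras _ _ hge, hvals, sum_counts]
  simp only [PySem.Set.empty, ← PySem.Set.ofList_eq_foldl, PySem.Set.len, hxs, List.length_map]
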